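-- pv_equiv track=rewrite | github.com/Joshua-Soteras/ibm_hacks | backend/agent_client.py | _extract_country_mineral
-- ===== SOURCE A (Python) =====
-- def _extract_country_mineral(scenario_text: str, countries: list, minerals: list):
--     """Case-insensitive keyword extraction of country and mineral from scenario text."""
--     text_lower = scenario_text.lower()
--     matched_country = None
--     matched_mineral = None
--
--     for c in sorted(countries, key=len, reverse=True):
--         if c.lower() in text_lower:
--             matched_country = c
--             break
--
--     for m in sorted(minerals, key=len, reverse=True):
--         if m.lower() in text_lower:
--             matched_mineral = m
--             break
--
--     return matched_country, matched_mineral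
-- ===== SOURCE B (Python) =====
-- def _extract_country_mineral(scenario_text: str, countries: list, minerals: list):
--     """Case-insensitive keyword extraction of country and mineral from scenario text."""
--     text_lower = scenario_text.lower()
--
--     def best_match(options):
--         best = None
--         for o in options:
--             if best is None or len(best) < len(o):
--                 if o.lower() in text_lower:
--                     best = o
--         return best
--
--     return best_match(countries), best_match(minerals)
-- ===== Notes on version B (the rewrite author's own statement) =====
-- stated objective: alternative
-- what changed: Replaced the sort-by-length-descending plus break-on-first-match loops with a single pass over each list that tracks the longest match, running the substring test only for candidates strictly longer than the current best (strict > so the earliest equal-length match wins, as the stable descending sort gives).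
import Mathlib
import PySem

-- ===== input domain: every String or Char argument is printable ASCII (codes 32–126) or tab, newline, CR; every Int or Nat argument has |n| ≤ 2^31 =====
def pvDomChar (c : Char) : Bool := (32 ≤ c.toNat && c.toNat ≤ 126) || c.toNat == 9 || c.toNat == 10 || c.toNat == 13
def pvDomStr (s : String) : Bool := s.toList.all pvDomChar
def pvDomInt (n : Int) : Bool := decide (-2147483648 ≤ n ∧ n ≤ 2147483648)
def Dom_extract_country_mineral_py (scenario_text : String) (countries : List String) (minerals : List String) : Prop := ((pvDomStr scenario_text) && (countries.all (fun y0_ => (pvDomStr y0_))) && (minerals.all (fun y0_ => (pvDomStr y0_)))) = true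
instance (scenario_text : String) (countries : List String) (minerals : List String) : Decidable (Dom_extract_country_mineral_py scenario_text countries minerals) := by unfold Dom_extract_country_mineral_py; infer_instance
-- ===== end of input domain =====

-- B replaces A's sort-descending-by-length-then-break with a single max-tracking pass (simpler; same return value).

-- ===== PORT A =====
-- the 'for c in …: if …: matched = c; break' loop of A
def pvFindA (text_lower : String) : List String → Option String
  | [] => none
  | c :: rest =>
      if PySem.Str.isIn (PySem.Str.lower c) text_lower then some c
      else pvFindA text_lower rest

def extract_country_mineral_py (scenario_text : String) (countries : List String) (minerals : List String) : Option String × Option String :=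
  let text_lower := PySem.Str.lower scenario_text
  (pvFindA text_lower (PySem.List.sorted countries (fun s => PySem.Str.len s) true),
   pvFindA text_lower (PySem.List.sorted minerals (fun s => PySem.Str.len s) true))

-- ===== PORT B =====
-- the 'best_match' helper of B: one pass, keep the longest match; the substring test
-- runs only for candidates strictly longer than the current best
def pvBestB (text_lower : String) (options : List String) : Option String :=
  options.foldl
    (fun best o =>
      if (match best with
          | none => true
          | some b => decide (PySem.Str.len b < PySem.Str.len o)) then
        (if PySem.Str.isIn (PySem.Str.lower o) text_lower then some o else best)
      else best)
    none

def extract_country_mineral_py_alt (scenario_text : String) (countries : List String) (minerals : List String) : Option String × Option String :=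
  let text_lower := PySem.Str.lower scenario_text
  (pvBestB text_lower countries, pvBestB text_lower minerals)

-- ===== PRECONDITION & SPEC =====
def Spec_extract_country_mineral_py (scenario_text : String) (countries : List String) (minerals : List String) (out : Option String × Option String) : Prop := out = extract_country_mineral_py_alt scenario_text countries minerals
instance (scenario_text : String) (countries : List String) (minerals : List String) (out : Option String × Option String) : Decidable (Spec_extract_country_mineral_py scenario_text countries minerals out) := by unfold Spec_extract_country_mineral_py; infer_instance

-- ===== CLAIM (what is proved, stated in full; the proofs are below) =====
def Claim_equal_extract_country_mineral_py : Prop := ∀ (scenario_text : String) (countries : List String) (minerals : List String), Dom_extract_country_mineral_py scenario_text countries minerals → Spec_extract_country_mineral_py scenario_text countries minerals (extract_country_mineral_py scenario_text countries minerals)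

-- ===== LEMMAS AND PROOFS =====

-- proof-side view of B's update step (the inner 'best = o' decision with the guard folded in)
def pvStepB (best : Option String) (o : String) : Option String :=
  match best with
  | none => some o
  | some b => if PySem.Str.len b < PySem.Str.len o then some o else some b

theorem pv_insertBy_nil {α : Type} (b : α → α → Bool) (x : α) :
    PySem.List.insertBy b x [] = [x] := by
  simp [PySem.List.insertBy]

theorem pv_insertBy_cons {α : Type} (b : α → α → Bool) (x y : α) (ys : List α) :
    PySem.List.insertBy b x (y :: ys) =
      if b x y then x :: y :: ys else y :: PySem.List.insertBy b x ys := by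
  simp [PySem.List.insertBy]

theorem pv_head?_insertBy {α : Type} (b : α → α → Bool) (x : α) (l : List α) :
    (PySem.List.insertBy b x l).head? =
      match l with
      | [] => some x
      | y :: _ => if b x y then some x else some y := by
  cases l with
  | nil => simp [pv_insertBy_nil]
  | cons y ys =>
      rw [pv_insertBy_cons]
      cases hb : b x y <;> simp [hb]

theorem pv_insertBy_front {α : Type} (b : α → α → Bool) (x : α) (l : List α)
    (h : ∀ z ∈ l, b x z = true) :
    PySem.List.insertBy b x l = x :: l := by
  cases l with
  | nil => simp [pv_insertBy_nil]
  | cons y ys => rw [pv_insertBy_cons, if_pos (h y (List.mem_cons_self ..))]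

theorem pv_filter_insertBy {α κ : Type} [LinearOrder κ] (key : α → κ) (p : α → Bool)
    (x : α) (l : List α) (hl : l.Pairwise (fun a b => key b ≤ key a)) :
    (PySem.List.insertBy (fun a b => decide (key b < key a)) x l).filter p =
      if p x then PySem.List.insertBy (fun a b => decide (key b < key a)) x (l.filter p)
      else l.filter p := by
  induction l with
  | nil =>
      rw [pv_insertBy_nil]
      cases hpx : p x <;> simp [hpx, pv_insertBy_nil]
  | cons y ys ih =>
      rcases List.pairwise_cons.mp hl with ⟨hy, hys⟩
      rw [pv_insertBy_cons]
      by_cases hxy : key y < key x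
      · rw [if_pos (by simpa using hxy)]
        cases hpx : p x
        · simp [hpx]
        · cases hpy : p y
          · -- y dropped: x still goes to the front of ys.filter p
            have hfront : PySem.List.insertBy (fun a b => decide (key b < key a)) x (ys.filter p)
                = x :: ys.filter p := by
              apply pv_insertBy_front
              intro z hz
              have hzy : key z ≤ key y := hy z (List.mem_of_mem_filter hz)
              simp [lt_of_le_of_lt hzy hxy]
            simp [hpx, hpy, hfront]
          · simp [hpx, hpy, pv_insertBy_cons, hxy]
      · rw [if_neg (by simpa using hxy)]
        cases hpy : p y
        · simpa [hpy] using ih hys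
        · cases hpx : p x
          · simp [hpy, hpx, ih hys]
          · simp [hpy, hpx, ih hys, pv_insertBy_cons, hxy]

theorem pv_sorted_append_singleton {α κ : Type} [LinearOrder κ] (key : α → κ)
    (xs : List α) (x : α) :
    PySem.List.sorted (xs ++ [x]) key true =
      PySem.List.insertBy (fun a b => decide (key b < key a)) x
        (PySem.List.sorted xs key true) := by
  rw [PySem.List.sorted_rev_eq_foldl_insertBy, PySem.List.sorted_rev_eq_foldl_insertBy,
    List.foldl_append, List.foldl_cons, List.foldl_nil]

theorem pv_sorted_nil {α κ : Type} [LinearOrder κ] (key : α → κ) :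
    PySem.List.sorted ([] : List α) key true = [] := by
  rw [PySem.List.sorted_rev_eq_foldl_insertBy, List.foldl_nil]

theorem pv_filter_sorted {α κ : Type} [LinearOrder κ] (key : α → κ) (p : α → Bool)
    (xs : List α) :
    (PySem.List.sorted xs key true).filter p = PySem.List.sorted (xs.filter p) key true := by
  induction xs using List.reverseRecOn with
  | nil => rw [pv_sorted_nil, List.filter_nil, pv_sorted_nil]
  | append_singleton l x ih =>
      rw [pv_sorted_append_singleton,
        pv_filter_insertBy key p x _ (PySem.List.sorted_pairwise_rev l key), ih,
        List.filter_append]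
      cases hpx : p x
      · simp [hpx]
      · simp [hpx, pv_sorted_append_singleton]

theorem pv_findA_eq_head_filter (tl : String) (l : List String) :
    pvFindA tl l =
      ((l.filter (fun s => PySem.Str.isIn (PySem.Str.lower s) tl)).head?) := by
  induction l with
  | nil => rfl
  | cons c rest ih =>
      rw [pvFindA, List.filter_cons]
      cases hc : PySem.Str.isIn (PySem.Str.lower c) tl
      · simp only [Bool.false_eq_true, if_false, ih]
      · simp only [if_true, List.head?_cons]

theorem pv_foldl_step_eq_head_sorted (l : List String) :
    l.foldl pvStepB none
      = (PySem.List.sorted l (fun s => PySem.Str.len s) true).head? := by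
  induction l using List.reverseRecOn with
  | nil => rw [List.foldl_nil, pv_sorted_nil]; rfl
  | append_singleton l x ih =>
      rw [List.foldl_append, List.foldl_cons, List.foldl_nil, ih,
        pv_sorted_append_singleton, pv_head?_insertBy]
      cases h : PySem.List.sorted l (fun s => PySem.Str.len s) true with
      | nil => rfl
      | cons y t => by_cases hyx : PySem.Str.len y < PySem.Str.len x <;> simp [pvStepB]

theorem pv_bestB_eq_findA_sorted (tl : String) (xs : List String) :
    pvFindA tl (PySem.List.sorted xs (fun s => PySem.Str.len s) true) = pvBestB tl xs := by
  rw [pv_findA_eq_head_filter,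
    pv_filter_sorted (fun s => PySem.Str.len s) (fun s => PySem.Str.isIn (PySem.Str.lower s) tl) xs,
    ← pv_foldl_step_eq_head_sorted]
  unfold pvBestB
  have hcongr := PySem.List.foldl_congr_mem
    (l := xs) (init := (none : Option String))
    (f := fun best o =>
      if (match best with
          | none => true
          | some b => decide (PySem.Str.len b < PySem.Str.len o)) then
        (if PySem.Str.isIn (PySem.Str.lower o) tl then some o else best)
      else best)
    (g := fun best o =>
      if PySem.Str.isIn (PySem.Str.lower o) tl then pvStepB best o else best)
    (fun best o _ => by
      cases best with
      | none => simp [pvStepB]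
      | some b =>
          simp only [pvStepB, decide_eq_true_eq]
          split_ifs <;> rfl)
  rw [hcongr]
  exact (PySem.List.foldl_if_eq_foldl_filter
    (fun s => PySem.Str.isIn (PySem.Str.lower s) tl) pvStepB xs none).symm

-- ===== VERDICT (by name: the statement is the Claim_ definition above) =====
theorem extract_country_mineral_py_spec : Claim_equal_extract_country_mineral_py := by
  intro scenario_text countries minerals _
  unfold Spec_extract_country_mineral_py extract_country_mineral_py extract_country_mineral_py_alt
  simp only []
  exact Prod.ext (pv_bestB_eq_findA_sorted _ _) (pv_bestB_eq_findA_sorted _ _)
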